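-- pv_equiv track=rewrite | github.com/titaniummachine1/Drawback-Chess-Engine | assistant/socketio_assistant.py | calculate_port
-- ===== SOURCE A (Python) =====
-- def calculate_port(game_id: str) -> int:
--     """Calculate Socket.IO port from game ID (matches GamePage.js logic)."""
--     hash_val = 0
--     for char in game_id:
--         hash_val = ((hash_val << 5) - hash_val) + ord(char)
--         hash_val = hash_val & 0xFFFFFFFF
--
--     while hash_val >= 2**32:
--         hash_val -= 2**32
--
--     return 5001 + (hash_val % 16)
-- ===== SOURCE B (Python) =====
-- def calculate_port(game_id: str) -> int:
--     """Alternating-sum form: 31 == -1 (mod 16) and 2**32 is a multiple of 16,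
--     so the rolling hash mod 16 is an alternating sum of character codes."""
--     total = 0
--     sign = 1
--     for ch in reversed(game_id):
--         total += sign * ord(ch)
--         sign = -sign
--     return 5001 + (total % 16)
-- ===== Notes on version B (the rewrite author's own statement) =====
-- stated objective: simpler
-- what changed: Replaces the 31*h shift/subtract rolling hash with 32-bit masking and a dead reduction loop by a plain alternating sum of character codes taken from the end of the string (valid since 31 ≡ -1 and 2^32 ≡ 0 mod 16), returning 5001 + sum % 16.
import Mathlib
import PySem

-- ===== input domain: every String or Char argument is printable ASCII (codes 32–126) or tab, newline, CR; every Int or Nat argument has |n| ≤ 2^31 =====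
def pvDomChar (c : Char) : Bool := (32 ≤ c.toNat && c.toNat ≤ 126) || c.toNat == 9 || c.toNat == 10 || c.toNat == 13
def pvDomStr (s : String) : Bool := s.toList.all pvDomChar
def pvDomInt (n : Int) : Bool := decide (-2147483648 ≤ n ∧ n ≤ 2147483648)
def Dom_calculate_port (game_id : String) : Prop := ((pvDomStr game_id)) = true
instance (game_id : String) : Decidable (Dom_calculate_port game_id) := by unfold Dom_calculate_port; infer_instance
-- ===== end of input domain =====

-- B replaces the masked 31·h rolling hash by an alternating sum of character codes
-- (31 ≡ -1 and 2^32 ≡ 0 mod 16), a simpler loop with no shift/mask; proved equal below.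

-- ===== PORT A =====
-- one step of A's loop: hash_val = ((hash_val << 5) - hash_val) + ord(char); hash_val &= 0xFFFFFFFF
-- (h << 5 is exact as h * 2^5: Python's << on int is multiplication by a power of two)
def pvStepA (h : Int) (c : Char) : Int :=
  PySem.Int.band ((h * 2 ^ 5) - h + (c.toNat : Int)) 0xFFFFFFFF

-- the (never-entered) 'while hash_val >= 2**32: hash_val -= 2**32' loop, ported literally
def pvWhileReduce (h : Int) : Int :=
  if 2 ^ 32 ≤ h then pvWhileReduce (h - 2 ^ 32) else h
termination_by h.toNat
decreasing_by
  rename_i hge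
  omega

def calculate_port (game_id : String) : Int :=
  let hash_val := game_id.toList.foldl pvStepA 0
  let hash_val := pvWhileReduce hash_val
  5001 + PySem.Int.mod hash_val 16

-- ===== PORT B =====
def calculate_port_alt (game_id : String) : Int :=
  let p := game_id.toList.reverse.foldl
    (fun (ts : Int × Int) c => (ts.1 + ts.2 * (c.toNat : Int), -ts.2)) (0, 1)
  5001 + PySem.Int.mod p.1 16

-- ===== PRECONDITION & SPEC =====
def Spec_calculate_port (game_id : String) (out : Int) : Prop := out = calculate_port_alt game_id
instance (game_id : String) (out : Int) : Decidable (Spec_calculate_port game_id out) := by unfold Spec_calculate_port; infer_instance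

-- ===== CLAIM (what is proved, stated in full; the proofs are below) =====
def Claim_equal_calculate_port : Prop := ∀ (game_id : String), Dom_calculate_port game_id → Spec_calculate_port game_id (calculate_port game_id)

-- ===== LEMMAS AND PROOFS =====

-- A's step, written out: for a nonnegative accumulator it is (31h + c) mod 2^32
theorem pvStepA_eq (h : Int) (c : Char) (hh : 0 ≤ h) :
    pvStepA h c = ((h * 31 + (c.toNat : Int)).toNat % 2 ^ 32 : Nat) := by
  unfold pvStepA
  rw [PySem.Int.band_of_nonneg (by omega) (by norm_num)]
  rw [show ((0xFFFFFFFF : Int)).toNat = 2 ^ 32 - 1 by rfl]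
  rw [Nat.and_two_pow_sub_one_eq_mod]
  congr 1
  omega

theorem pvStepA_nonneg (h : Int) (c : Char) (hh : 0 ≤ h) : 0 ≤ pvStepA h c := by
  rw [pvStepA_eq h c hh]; exact Int.natCast_nonneg _

theorem pvStepA_lt (h : Int) (c : Char) (hh : 0 ≤ h) : pvStepA h c < 2 ^ 32 := by
  rw [pvStepA_eq h c hh]
  exact_mod_cast Nat.mod_lt _ (by norm_num)

theorem pvStepA_mod16 (h : Int) (c : Char) (hh : 0 ≤ h) :
    pvStepA h c ≡ (c.toNat : Int) - h [ZMOD 16] := by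
  rw [pvStepA_eq h c hh]
  have hnn : 0 ≤ h * 31 + (c.toNat : Int) := by positivity
  have hcast : (((h * 31 + (c.toNat : Int)).toNat % 2 ^ 32 : Nat) : Int)
      = (h * 31 + (c.toNat : Int)) % (2 ^ 32 : Int) := by
    push_cast [Int.toNat_of_nonneg hnn]
    norm_num
  rw [hcast]
  calc (h * 31 + (c.toNat : Int)) % (2 ^ 32 : Int)
      ≡ h * 31 + (c.toNat : Int) [ZMOD 16] :=
        Int.emod_emod_of_dvd _ (by norm_num)
    _ ≡ (c.toNat : Int) - h [ZMOD 16] :=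
        Int.modEq_iff_dvd.mpr ⟨-(2 * h), by ring⟩

-- the "substitute c - h for the step" reference recursion
def pvA' : List Char → Int → Int
  | [], x => x
  | c :: r, x => pvA' r ((c.toNat : Int) - x)

theorem pvA'_congr (l : List Char) (x y : Int) (h : x ≡ y [ZMOD 16]) :
    pvA' l x ≡ pvA' l y [ZMOD 16] := by
  induction l generalizing x y with
  | nil => exact h
  | cons c r ih => exact ih _ _ (Int.ModEq.sub_left _ h)

theorem pvFoldA_mod16 (l : List Char) (h : Int) (hh : 0 ≤ h) :
    l.foldl pvStepA h ≡ pvA' l h [ZMOD 16] := by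
  induction l generalizing h with
  | nil => rfl
  | cons c r ih =>
    simp only [List.foldl_cons, pvA']
    exact (ih _ (pvStepA_nonneg h c hh)).trans (pvA'_congr r _ _ (pvStepA_mod16 h c hh))

-- alternating sum from the front: AS (c :: r) = c - AS r
def pvAS : List Char → Int
  | [] => 0
  | c :: r => (c.toNat : Int) - pvAS r

theorem pvAS_append (l : List Char) (c : Char) :
    pvAS (l ++ [c]) = pvAS l + (-1) ^ l.length * (c.toNat : Int) := by
  induction l with
  | nil => simp [pvAS]
  | cons d r ih => simp [pvAS, ih, pow_succ]; ring

theorem pvA'_eq (l : List Char) (x : Int) :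
    pvA' l x = pvAS l.reverse + (-1) ^ l.length * x := by
  induction l generalizing x with
  | nil => simp [pvA', pvAS]
  | cons c r ih =>
    simp only [pvA', ih, List.reverse_cons, pvAS_append, List.length_reverse,
      List.length_cons, pow_succ]
    ring

theorem pvFoldB_fst (l : List Char) (t s : Int) :
    (l.foldl (fun (ts : Int × Int) c => (ts.1 + ts.2 * (c.toNat : Int), -ts.2)) (t, s)).1
      = t + s * pvAS l := by
  induction l generalizing t s with
  | nil => simp [pvAS]
  | cons c r ih => simp [pvAS, ih]; ring

theorem pvFoldA_nonneg (l : List Char) (h : Int) (hh : 0 ≤ h) :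
    0 ≤ l.foldl pvStepA h ∧ l.foldl pvStepA h < 2 ^ 32 ∨ l = [] := by
  induction l generalizing h with
  | nil => exact Or.inr rfl
  | cons c r ih =>
    left
    simp only [List.foldl_cons]
    rcases ih (pvStepA h c) (pvStepA_nonneg h c hh) with ⟨h1, h2⟩ | h3
    · exact ⟨h1, h2⟩
    · subst h3; exact ⟨pvStepA_nonneg h c hh, pvStepA_lt h c hh⟩

theorem pvWhileReduce_id (h : Int) (hlt : h < 2 ^ 32) : pvWhileReduce h = h := by
  unfold pvWhileReduce
  rw [if_neg (by omega)]

-- ===== VERDICT (by name: the statement is the Claim_ definition above) =====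
theorem calculate_port_spec : Claim_equal_calculate_port := by
  intro game_id _
  unfold Spec_calculate_port calculate_port calculate_port_alt
  simp only []
  set l := game_id.toList with hl
  have hrange : l.foldl pvStepA 0 < 2 ^ 32 := by
    rcases pvFoldA_nonneg l 0 le_rfl with ⟨_, h2⟩ | h3
    · exact h2
    · simp [h3]
  rw [pvWhileReduce_id _ hrange]
  have hmod : l.foldl pvStepA 0 ≡
      (l.reverse.foldl (fun (ts : Int × Int) c => (ts.1 + ts.2 * (c.toNat : Int), -ts.2)) (0, 1)).1
      [ZMOD 16] := by
    rw [pvFoldB_fst]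
    have := pvFoldA_mod16 l 0 le_rfl
    rw [pvA'_eq] at this
    simpa [List.reverse_reverse] using this
  have : PySem.Int.mod (l.foldl pvStepA 0) 16 = PySem.Int.mod
      ((l.reverse.foldl (fun (ts : Int × Int) c => (ts.1 + ts.2 * (c.toNat : Int), -ts.2)) (0, 1)).1) 16 := by
    rw [PySem.Int.mod_eq_emod_of_pos (show (0:Int) < 16 by norm_num),
      PySem.Int.mod_eq_emod_of_pos (show (0:Int) < 16 by norm_num)]
    exact hmod
  omega
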